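-- pv_equiv track=rewrite | github.com/eguilg/coding-interview-guide | collection/zuoyebang/problems.py | maxKthInMat
-- ===== SOURCE A (Python) =====
-- from heapq import heapify, heappop, heappush
--
-- def maxKthInMat(mat, k):
--     if mat is None or k < 1:
--         return None
--     n , m = len(mat), len(mat[0])
--     hp = []
--     for i in range(n-1, -1, -1):
--         if len(hp) == k:
--             break
--         heappush(hp, (mat[i][-1], i, m-1))
--     for i in range(n-1, max(-1, n-k-1), -1):
--         j = m - 2
--         while j >= 0:
--             if len(hp) == k and mat[i][j] > hp[0][0]:
--                 heappop(hp)
--             if len(hp) < k: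
--                 heappush(hp, (mat[i][j], i, j))
--             j -= 1
--     return hp[0][0]
-- ===== SOURCE B (Python) =====
-- def maxKthInMat(mat, k):
--     if mat is None or k < 1:
--         return None
--     vals = sorted((x for row in mat[max(0, len(mat) - k):] for x in row), reverse=True)
--     return vals[min(k, len(vals)) - 1]
-- ===== Notes on version B (the rewrite author's own statement) =====
-- stated objective: faster
-- what changed: Replaces the two heap-maintenance loops (push/pop of (value,i,j) tuples through a size-k min-heap per cell) by flattening the bottom min(k,n) rows once and indexing the k-th element of the descending-sorted value list.
-- outside the precondition, e.g. on maxKthInMat([[1], [2, 3]], 2): A returns 1, B returns 2; on maxKthInMat([[1, 2], [3]], 2): A returns 3, B returns 2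
import Mathlib
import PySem

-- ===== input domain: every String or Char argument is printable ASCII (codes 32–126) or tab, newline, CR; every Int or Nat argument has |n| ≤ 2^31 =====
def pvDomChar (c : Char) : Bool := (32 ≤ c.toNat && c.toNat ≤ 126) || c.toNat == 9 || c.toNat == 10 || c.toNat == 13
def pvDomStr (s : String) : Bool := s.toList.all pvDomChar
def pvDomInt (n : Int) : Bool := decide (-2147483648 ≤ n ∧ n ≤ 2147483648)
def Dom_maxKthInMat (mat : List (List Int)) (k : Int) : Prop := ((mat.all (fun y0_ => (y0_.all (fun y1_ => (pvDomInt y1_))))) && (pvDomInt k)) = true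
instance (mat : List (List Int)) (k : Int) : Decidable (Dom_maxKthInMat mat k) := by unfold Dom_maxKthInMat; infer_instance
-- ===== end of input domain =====

-- B replaces A's per-cell heap maintenance by one flatten + one descending sort + one index (objective: faster by a constant factor).

-- ===== PORT A =====
-- Python tuple comparison (v,i,j) <= (v',i',j'): lexicographic
def tupLe (a b : Int × Int × Int) : Bool :=
  decide (a.1 < b.1) || (decide (a.1 = b.1) &&
    (decide (a.2.1 < b.2.1) || (decide (a.2.1 = b.2.1) && decide (a.2.2 ≤ b.2.2))))

-- heapq model: the heap is kept as an ascending sorted list; heappush = ordered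
-- insertion, hp[0] = head, heappop = tail.  Observationally exact: the Python code
-- only reads len(hp), hp[0] (the minimum) and pops the minimum.
def hpush (t : Int × Int × Int) : List (Int × Int × Int) → List (Int × Int × Int)
  | [] => [t]
  | b :: s => if tupLe t b then t :: b :: s else b :: hpush t s

-- first loop: for i in range(n-1,-1,-1): if len(hp)==k: break; heappush(hp,(mat[i][-1],i,m-1))
def loop1 (mat : List (List Int)) (m k : Int) :
    List Int → List (Int × Int × Int) → Option (List (Int × Int × Int))
  | [], hp => some hp
  | i :: is, hp =>
    if (hp.length : Int) = k then some hp
    else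
      match PySem.List.pyGet? mat i with
      | none => none          -- IndexError mat[i]
      | some row =>
        match PySem.List.pyGet? row (-1) with
        | none => none        -- IndexError mat[i][-1]
        | some v => loop1 mat m k is (hpush (v, i, m - 1) hp)

-- inner while loop: j = m-2; while j >= 0: … ; j -= 1   (ported over the countdown list of j's)
def loop2body (mat : List (List Int)) (k i : Int) :
    List Int → List (Int × Int × Int) → Option (List (Int × Int × Int))
  | [], hp => some hp
  | j :: js, hp =>
    match PySem.List.pyGet? mat i with
    | none => none            -- IndexError mat[i]
    | some row =>
      match PySem.List.pyGet? row j with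
      | none => none          -- IndexError mat[i][j]
      | some v =>
        -- if len(hp) == k and mat[i][j] > hp[0][0]: heappop(hp)
        let hp1 := if (hp.length : Int) = k then
            (match hp with
             | h :: rest => if h.1 < v then rest else hp
             | [] => hp)      -- unreachable: len(hp)=k ≥ 1 when evaluated
          else hp
        -- if len(hp) < k: heappush(hp, (mat[i][j], i, j))
        let hp2 := if (hp1.length : Int) < k then hpush (v, i, j) hp1 else hp1
        loop2body mat k i js hp2

-- second loop: for i in range(n-1, max(-1, n-k-1), -1): <inner while loop>
def loop2 (mat : List (List Int)) (m k : Int) :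
    List Int → List (Int × Int × Int) → Option (List (Int × Int × Int))
  | [], hp => some hp
  | i :: is, hp =>
    match loop2body mat k i (PySem.List.pyRange (m - 2) (-1) (-1)) hp with
    | none => none
    | some hp' => loop2 mat m k is hp'

def maxKthInMat (mat : List (List Int)) (k : Int) : Option Int :=
  if k < 1 then none                           -- 'if mat is None or k < 1: return None'
  else
    match PySem.List.pyGet? mat 0 with
    | none => none                             -- IndexError: len(mat[0]) on empty mat
    | some row0 =>
      let n : Int := mat.length
      let m : Int := row0.length
      match loop1 mat m k (PySem.List.pyRange (n - 1) (-1) (-1)) [] with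
      | none => none
      | some hp =>
        match loop2 mat m k (PySem.List.pyRange (n - 1) (max (-1) (n - k - 1)) (-1)) hp with
        | none => none
        | some hp' =>
          match hp' with
          | h :: _ => some h.1                 -- return hp[0][0]
          | [] => none                         -- IndexError hp[0] (empty heap)

-- ===== PORT B =====
def maxKthInMat_alt (mat : List (List Int)) (k : Int) : Option Int :=
  if k < 1 then none
  else
    let n : Int := mat.length
    let vals := (PySem.List.slice mat (some (max 0 (n - k))) none).flatMap (fun row => row)
    let s := PySem.List.sorted vals (fun x => x) true
    PySem.List.pyGet? s (min k (vals.length : Int) - 1)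

-- ===== PRECONDITION & SPEC =====
-- Pre_ excludes (for k ≥ 1) the empty matrix and non-rectangular or zero-width matrices:
-- there A raises IndexError (empty matrix, a row shorter than len(mat[0])-1) or returns an
-- accidental value mixing each row's own last element with the first row's column count
-- (a longer row's cells are skipped, a shorter row's last cell is double-counted).
def Pre_maxKthInMat (mat : List (List Int)) (k : Int) : Prop :=
  k < 1 ∨ (mat ≠ [] ∧ (mat.headD []).length ≠ 0 ∧
    ∀ row ∈ mat, row.length = (mat.headD []).length)
instance (mat : List (List Int)) (k : Int) : Decidable (Pre_maxKthInMat mat k) := by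
  unfold Pre_maxKthInMat; infer_instance

def pvWitness_maxKthInMat : List (List Int) × Int := ([[1, 2], [3, 4]], 2)

def Spec_maxKthInMat (mat : List (List Int)) (k : Int) (out : Option Int) : Prop := out = maxKthInMat_alt mat k
instance (mat : List (List Int)) (k : Int) (out : Option Int) : Decidable (Spec_maxKthInMat mat k out) := by unfold Spec_maxKthInMat; infer_instance

-- ===== CLAIM (what is proved, stated in full; the proofs are below) =====
def Claim_equal_maxKthInMat : Prop := ∀ (mat : List (List Int)) (k : Int), Dom_maxKthInMat mat k → Pre_maxKthInMat mat k → Spec_maxKthInMat mat k (maxKthInMat mat k)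

-- ===== LEMMAS AND PROOFS =====

-- value-level insertion (what hpush does to the value list of a sorted heap)
def insI (v : Int) : List Int → List Int
  | [] => [v]
  | b :: s => if v ≤ b then v :: b :: s else b :: insI v s

-- value-level effect of one cell on the heap's ascending value list
def vstep (k : Int) (s : List Int) (v : Int) : List Int :=
  if (s.length : Int) = k then
    match s with
    | [] => if (0 : Int) < k then insI v [] else []
    | h :: t => if h < v then insI v t else h :: t
  else if (s.length : Int) < k then insI v s else s

def srt (vs : List Int) : List Int := PySem.List.sorted vs (fun x => x) false
def topk (k : Nat) (vs : List Int) : List Int := (srt vs).drop (vs.length - k)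

def HSorted (hp : List (Int × Int × Int)) : Prop :=
  hp.Pairwise (fun a b => tupLe a b = true)

lemma tupLe_fst {a b : Int × Int × Int} (h : tupLe a b = true) : a.1 ≤ b.1 := by
  simp [tupLe] at h; omega

lemma tupLe_of_not {a b : Int × Int × Int} (h : ¬ tupLe a b = true) : tupLe b a = true := by
  simp [tupLe] at *; omega

lemma tupLe_trans {a b c : Int × Int × Int} (h1 : tupLe a b = true) (h2 : tupLe b c = true) :
    tupLe a c = true := by
  simp [tupLe] at *; omega

lemma mem_hpush {t x : Int × Int × Int} {hp : List (Int × Int × Int)}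
    (h : x ∈ hpush t hp) : x = t ∨ x ∈ hp := by
  induction hp with
  | nil => simp [hpush] at h; exact Or.inl h
  | cons b s ih =>
    by_cases hle : tupLe t b = true
    · rw [hpush, if_pos hle] at h
      simp only [List.mem_cons] at h
      rcases h with h | h
      · exact Or.inl h
      · exact Or.inr (List.mem_cons.mpr h)
    · rw [hpush, if_neg hle] at h
      simp only [List.mem_cons] at h
      rcases h with h | h
      · exact Or.inr (List.mem_cons.mpr (Or.inl h))
      · rcases ih h with h | h
        · exact Or.inl h
        · exact Or.inr (List.mem_cons.mpr (Or.inr h))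

lemma hsorted_hpush {hp : List (Int × Int × Int)} (t : Int × Int × Int) (h : HSorted hp) :
    HSorted (hpush t hp) := by
  induction hp with
  | nil => simp [hpush, HSorted]
  | cons b s ih =>
    rcases (List.pairwise_cons.mp h) with ⟨hb, hs⟩
    by_cases hle : tupLe t b = true
    · rw [hpush, if_pos hle]
      refine List.pairwise_cons.mpr ⟨?_, h⟩
      intro x hx
      rcases List.mem_cons.mp hx with hx | hx
      · exact hx ▸ hle
      · exact tupLe_trans hle (hb x hx)
    · rw [hpush, if_neg hle]
      refine List.pairwise_cons.mpr ⟨?_, ih hs⟩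
      intro x hx
      rcases mem_hpush hx with h' | h'
      · exact h' ▸ tupLe_of_not hle
      · exact hb x h'

lemma insI_front {v : Int} {l : List Int} (h : ∀ x ∈ l, v ≤ x) : insI v l = v :: l := by
  cases l with
  | nil => rfl
  | cons b s => simp [insI, h b (by simp)]

lemma map_fst_hpush {hp : List (Int × Int × Int)} (t : Int × Int × Int) (h : HSorted hp) :
    (hpush t hp).map (·.1) = insI t.1 (hp.map (·.1)) := by
  induction hp with
  | nil => rfl
  | cons b s ih =>
    rcases (List.pairwise_cons.mp h) with ⟨hb, hs⟩
    by_cases hle : tupLe t b = true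
    · have : t.1 ≤ b.1 := tupLe_fst hle
      simp [hpush, hle, insI, this]
    · have hge : b.1 ≤ t.1 := tupLe_fst (tupLe_of_not hle)
      by_cases hv : t.1 ≤ b.1
      · -- equal values: insertion lands later in the tuple order but the value list is the same
        have heq : t.1 = b.1 := le_antisymm hv hge
        have hall : ∀ x ∈ s.map (·.1), b.1 ≤ x := by
          intro x hx
          rcases List.mem_map.mp hx with ⟨y, hy, rfl⟩
          exact tupLe_fst (hb y hy)
        simp [hpush, hle, insI, ih hs, heq, insI_front hall]
      · simp [hpush, hle, insI, hv, ih hs]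

lemma insI_perm (v : Int) (l : List Int) : (insI v l).Perm (v :: l) := by
  induction l with
  | nil => rfl
  | cons b s ih =>
    by_cases h : v ≤ b
    · simp [insI, h]
    · simp only [insI, h, ite_false]
      exact (ih.cons b).trans (List.Perm.swap v b s)

lemma insI_pairwise {v : Int} {l : List Int} (h : l.Pairwise (· ≤ ·)) :
    (insI v l).Pairwise (· ≤ ·) := by
  induction l with
  | nil => simp [insI]
  | cons b s ih =>
    rcases (List.pairwise_cons.mp h) with ⟨hb, hs⟩
    by_cases hle : v ≤ b
    · rw [insI, if_pos hle]
      refine List.pairwise_cons.mpr ⟨?_, h⟩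
      intro x hx
      rcases List.mem_cons.mp hx with hx | hx
      · exact hx ▸ hle
      · exact le_trans hle (hb x hx)
    · rw [insI, if_neg hle]
      refine List.pairwise_cons.mpr ⟨?_, ih hs⟩
      intro x hx
      rcases List.mem_cons.mp ((insI_perm v s).mem_iff.mp hx) with hx | hx
      · exact hx ▸ (by omega)
      · exact hb x hx

lemma srt_perm (vs : List Int) : (srt vs).Perm vs := PySem.List.sorted_perm vs (fun x => x) false

lemma srt_pairwise (vs : List Int) : (srt vs).Pairwise (· ≤ ·) :=
  PySem.List.sorted_pairwise vs (fun x => x)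

lemma length_srt (vs : List Int) : (srt vs).length = vs.length := (srt_perm vs).length_eq

lemma srt_append_singleton (vs : List Int) (v : Int) : srt (vs ++ [v]) = insI v (srt vs) := by
  apply PySem.List.eq_of_perm_of_pairwise_le_of_injective (fun x => x) (fun a b h => h)
  · exact (srt_perm (vs ++ [v])).trans
      ((List.perm_append_singleton v vs).trans
        ((((srt_perm vs).symm).cons v).trans (insI_perm v (srt vs)).symm))
  · exact srt_pairwise (vs ++ [v])
  · exact insI_pairwise (srt_pairwise vs)

lemma drop_insI_of_lt {s : List Int} {v : Int} :
    ∀ d, (hd : d < s.length) → s.Pairwise (· ≤ ·) → s[d] < v →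
    (insI v s).drop (d + 1) = insI v (s.drop (d + 1)) := by
  induction s with
  | nil => intro d hd; simp at hd
  | cons a t ih =>
    intro d hd hsort hv
    rcases (List.pairwise_cons.mp hsort) with ⟨ha, ht⟩
    cases d with
    | zero =>
      have : ¬ v ≤ a := by simpa using hv
      simp [insI, this]
    | succ e =>
      have he : e < t.length := by simpa using hd
      have hev : t[e] < v := by simpa using hv
      have hna : ¬ v ≤ a := by
        have := ha t[e] (List.getElem_mem he)
        omega
      simp only [insI, hna, ite_false, List.drop_succ_cons]
      exact ih e he ht hev

lemma drop_insI_of_le {s : List Int} {v : Int} :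
    ∀ d, (hd : d < s.length) → v ≤ s[d] →
    (insI v s).drop (d + 1) = s.drop d := by
  induction s with
  | nil => intro d hd; simp at hd
  | cons a t ih =>
    intro d hd hv
    by_cases hle : v ≤ a
    · simp [insI, hle]
    · cases d with
      | zero => simp at hv; omega
      | succ e =>
        have he : e < t.length := by simpa using hd
        have hev : v ≤ t[e] := by simpa using hv
        simp only [insI, hle, ite_false, List.drop_succ_cons]
        exact ih e he hev

lemma topk_nil (k : Nat) : topk k [] = [] := by simp [topk, srt, PySem.List.sorted]

lemma vstep_topk {k : Int} (hk : 1 ≤ k) (vs : List Int) (v : Int) :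
    topk k.toNat (vs ++ [v]) = vstep k (topk k.toNat vs) v := by
  have hsrt := srt_pairwise vs
  have hlen := length_srt vs
  set s := srt vs with hs
  have hlen1 : (vs ++ [v]).length = vs.length + 1 := by simp
  rw [topk, topk, srt_append_singleton, hlen1, ← hs]
  by_cases hsmall : vs.length < k.toNat
  · have h0 : vs.length + 1 - k.toNat = 0 := by omega
    have h0' : vs.length - k.toNat = 0 := by omega
    rw [h0, h0', List.drop_zero, List.drop_zero, vstep.eq_def]
    have hne : ¬ ((s.length : Int) = k) := by rw [hlen]; omega
    have hlt : ((s.length : Int) < k) := by rw [hlen]; omega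
    rw [if_neg hne, if_pos hlt]
  · -- vs.length ≥ k
    have hkn : k.toNat ≤ vs.length := by omega
    set d := vs.length - k.toNat with hd
    have hdlt : d < s.length := by rw [hlen]; omega
    have hcons : s.drop d = s[d] :: s.drop (d + 1) := List.drop_eq_getElem_cons hdlt
    have harith : vs.length + 1 - k.toNat = d + 1 := by omega
    rw [harith, vstep.eq_def, hcons]
    have hlhp' : (((s[d] :: s.drop (d + 1)).length : Int)) = k := by
      simp [hlen]; omega
    rw [if_pos hlhp']
    show List.drop (d + 1) (insI v s) =
      if s[d] < v then insI v (s.drop (d + 1)) else s[d] :: s.drop (d + 1)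
    by_cases hv : s[d] < v
    · rw [if_pos hv]
      exact drop_insI_of_lt d hdlt hsrt hv
    · rw [if_neg hv, ← hcons]
      exact drop_insI_of_le d hdlt (by omega)

lemma foldl_vstep_topk {k : Int} (hk : 1 ≤ k) :
    ∀ (ws vs : List Int), ws.foldl (vstep k) (topk k.toNat vs) = topk k.toNat (vs ++ ws) := by
  intro ws
  induction ws with
  | nil => intro vs; simp
  | cons w ws ih =>
    intro vs
    rw [List.foldl_cons, ← vstep_topk hk, ih]
    simp

def tstep (k i j v : Int) (hp : List (Int × Int × Int)) : List (Int × Int × Int) :=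
  if ((hp.length : Int) = k) then
    match hp with
    | [] => if ((0 : Int) < k) then hpush (v, i, j) [] else []
    | h :: rest => if h.1 < v then hpush (v, i, j) rest else h :: rest
  else if ((hp.length : Int) < k) then hpush (v, i, j) hp else hp

lemma tstep_eq (k i j v : Int) (hp : List (Int × Int × Int)) :
    (if (((if ((hp.length : Int) = k) then
            (match hp with | h :: rest => if h.1 < v then rest else hp | [] => hp)
          else hp).length : Int) < k)
     then hpush (v, i, j) (if ((hp.length : Int) = k) then
            (match hp with | h :: rest => if h.1 < v then rest else hp | [] => hp) else hp)
     else (if ((hp.length : Int) = k) then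
            (match hp with | h :: rest => if h.1 < v then rest else hp | [] => hp) else hp))
    = tstep k i j v hp := by
  cases hp with
  | nil =>
    simp only [tstep, ite_self, List.length_nil]
    split_ifs <;> try rfl
    all_goals (exfalso; omega)
  | cons h rest =>
    simp only [tstep, List.length_cons]
    split_ifs <;> try rfl
    all_goals (simp only [List.length_cons] at *; try rfl)
    all_goals (exfalso; omega)

lemma length_hpush (t : Int × Int × Int) (hp : List (Int × Int × Int)) :
    (hpush t hp).length = hp.length + 1 := by
  induction hp with
  | nil => rfl
  | cons b s ih => by_cases h : tupLe t b = true <;> simp [hpush, h, ih]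

lemma tstep_sorted_map (k i j v : Int) (hp : List (Int × Int × Int)) (hs : HSorted hp) :
    HSorted (tstep k i j v hp) ∧
      (tstep k i j v hp).map (·.1) = vstep k (hp.map (·.1)) v := by
  cases hp with
  | nil =>
    constructor
    · simp only [tstep]
      split_ifs <;> first | exact List.pairwise_singleton _ _ | exact List.Pairwise.nil
    · simp only [tstep, vstep, List.map_nil, List.length_nil]
      split_ifs <;> rfl
  | cons h rest =>
    have hrest : HSorted rest := (List.pairwise_cons.mp hs).2
    constructor
    · simp only [tstep, List.length_cons]
      split_ifs <;> first
        | exact hsorted_hpush _ hrest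
        | exact hs
        | exact hsorted_hpush _ hs
    · simp only [tstep, vstep, List.map_cons, List.length_cons, List.length_map]
      split_ifs <;> first
        | rfl
        | exact map_fst_hpush _ hrest
        | (rw [map_fst_hpush _ hs]; simp)

lemma loop2body_spec (mat : List (List Int)) (k i : Int) (row : List Int)
    (hrow : PySem.List.pyGet? mat i = some row) :
    ∀ (js : List Int) (hp : List (Int × Int × Int)), HSorted hp →
      (∀ j ∈ js, 0 ≤ j ∧ j < (row.length : Int)) →
      ∃ hp', loop2body mat k i js hp = some hp' ∧ HSorted hp' ∧
        hp'.map (·.1) =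
          (js.map (fun j => PySem.List.pyGetD row j 0)).foldl (vstep k) (hp.map (·.1)) := by
  intro js
  induction js with
  | nil => intro hp hs _; exact ⟨hp, rfl, hs, rfl⟩
  | cons j js ih =>
    intro hp hs hb
    obtain ⟨hj0, hjl⟩ := hb j (by simp)
    have hget : PySem.List.pyGet? row j = some (PySem.List.pyGetD row j 0) := by
      rw [PySem.List.pyGet?_eq_some_getElem row hj0 hjl, PySem.List.pyGetD_eq_getElem row 0 hj0 hjl]
    obtain ⟨hss, hmap⟩ := tstep_sorted_map k i j (PySem.List.pyGetD row j 0) hp hs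
    obtain ⟨hp', heq, hs', hmap'⟩ :=
      ih (tstep k i j (PySem.List.pyGetD row j 0) hp) hss (fun x hx => hb x (by simp [hx]))
    refine ⟨hp', ?_, hs', ?_⟩
    · simp only [loop2body, hrow, hget]
      rw [tstep_eq]
      exact heq
    · rw [hmap', hmap]
      simp [List.foldl_cons]

lemma loop1_spec (mat : List (List Int)) (m k : Int) (rows : Int → List Int) (hk : 1 ≤ k) :
    ∀ (is : List Int) (hp : List (Int × Int × Int)), HSorted hp → hp.length ≤ k.toNat →
      (∀ i ∈ is.take (k.toNat - hp.length),
          PySem.List.pyGet? mat i = some (rows i) ∧ rows i ≠ []) →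
      ∃ hp', loop1 mat m k is hp = some hp' ∧ HSorted hp' ∧ hp'.length ≤ k.toNat ∧
        hp'.map (·.1) =
          ((is.take (k.toNat - hp.length)).map
            (fun i => (rows i).getLast?.getD 0)).foldl (vstep k) (hp.map (·.1)) := by
  intro is
  induction is with
  | nil => intro hp hs hl _; exact ⟨hp, rfl, hs, hl, by simp⟩
  | cons i is ih =>
    intro hp hs hl hr
    by_cases hfull : ((hp.length : Int) = k)
    · have h0 : k.toNat - hp.length = 0 := by omega
      refine ⟨hp, ?_, hs, hl, by simp [h0]⟩
      rw [loop1, if_pos hfull]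
    · have hlt : hp.length < k.toNat := by omega
      have hsucc : k.toNat - hp.length = (k.toNat - (hp.length + 1)) + 1 := by omega
      obtain ⟨hget, hne⟩ := hr i (by rw [hsucc, List.take_succ_cons]; simp)
      obtain ⟨x, hx⟩ := List.getLast?_isSome.mpr hne |> Option.isSome_iff_exists.mp
      have hlast : PySem.List.pyGet? (rows i) (-1) = some x := by
        rw [PySem.List.pyGet?_neg_one]; exact hx
      have hxval : x = (rows i).getLast?.getD 0 := by rw [hx]; rfl
      have hs2 := hsorted_hpush (x, i, m - 1) hs
      have hl2 : (hpush (x, i, m - 1) hp).length ≤ k.toNat := by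
        rw [length_hpush]; omega
      obtain ⟨hp', heq, hs', hl', hmap'⟩ := ih (hpush (x, i, m - 1) hp) hs2 hl2 (by
        intro y hy
        refine hr y ?_
        rw [hsucc, List.take_succ_cons]
        simp only [length_hpush] at hy
        simpa using Or.inr hy)
      rw [length_hpush] at hmap'
      refine ⟨hp', ?_, hs', hl', ?_⟩
      · rw [loop1, if_neg hfull]
        simp only [hget, hlast]
        exact heq
      · rw [hmap', hsucc, List.take_succ_cons, List.map_cons, List.foldl_cons]
        congr 1
        rw [map_fst_hpush _ hs]
        have hmlen : ((hp.map (·.1)).length : Int) = (hp.length : Int) := by simp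
        rw [vstep.eq_def, if_neg (by rw [hmlen]; exact hfull), if_pos (by rw [hmlen]; omega)]
        rw [hxval]

lemma loop2_spec (mat : List (List Int)) (m k : Int) (rows : Int → List Int) :
    ∀ (is : List Int) (hp : List (Int × Int × Int)), HSorted hp →
      (∀ i ∈ is, PySem.List.pyGet? mat i = some (rows i) ∧ ((rows i).length : Int) = m) →
      ∃ hp', loop2 mat m k is hp = some hp' ∧ HSorted hp' ∧
        hp'.map (·.1) =
          (is.flatMap (fun i => (PySem.List.pyRange (m - 2) (-1) (-1)).map
            (fun j => PySem.List.pyGetD (rows i) j 0))).foldl (vstep k) (hp.map (·.1)) := by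
  intro is
  induction is with
  | nil => intro hp hs _; exact ⟨hp, rfl, hs, by simp⟩
  | cons i is ih =>
    intro hp hs hr
    obtain ⟨hget, hlen⟩ := hr i (by simp)
    have hb : ∀ j ∈ PySem.List.pyRange (m - 2) (-1) (-1), 0 ≤ j ∧ j < ((rows i).length : Int) := by
      intro j hj
      have := (PySem.List.mem_pyRange_neg_one).mp hj
      omega
    obtain ⟨hp1, heq1, hs1, hmap1⟩ :=
      loop2body_spec mat k i (rows i) hget (PySem.List.pyRange (m - 2) (-1) (-1)) hp hs hb
    obtain ⟨hp', heq', hs', hmap'⟩ := ih hp1 hs1 (fun y hy => hr y (by simp [hy]))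
    refine ⟨hp', ?_, hs', ?_⟩
    · rw [loop2, heq1]
      exact heq'
    · rw [hmap', hmap1, List.flatMap_cons, List.foldl_append]

lemma countdown_row (row : List Int) :
    (PySem.List.pyRange ((row.length : Int) - 2) (-1) (-1)).map
      (fun j => PySem.List.pyGetD row j 0) = row.dropLast.reverse := by
  rw [PySem.List.pyRange_neg_one, List.map_map]
  have hcnt : ((row.length : Int) - 2 - (-1)).toNat = row.length - 1 := by omega
  rw [hcnt]
  apply List.ext_getElem
  · simp
  · intro u h1 h2
    simp only [List.getElem_map, List.getElem_range, Function.comp_apply]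
    have hu : u < row.length - 1 := by simpa using h1
    have h0 : (0 : Int) ≤ (row.length : Int) - 2 - u := by omega
    have hlt : (row.length : Int) - 2 - u < (row.length : Int) := by omega
    rw [PySem.List.pyGetD_eq_getElem row 0 h0 hlt, List.getElem_reverse, List.getElem_dropLast]
    congr 1
    simp only [List.length_dropLast]
    omega

lemma row_perm (row : List Int) (hne : row ≠ []) :
    ((row.getLast?.getD 0) :: row.dropLast.reverse).Perm row := by
  obtain ⟨x, hx⟩ := List.getLast?_isSome.mpr hne |> Option.isSome_iff_exists.mp
  have hx' : row.getLast?.getD 0 = x := by rw [hx]; rfl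
  rw [hx']
  have hsplit : row.dropLast ++ [x] = row := by
    have h1 := List.dropLast_append_getLast hne
    have h2 : row.getLast hne = x := by
      rw [List.getLast?_eq_some_getLast hne] at hx
      exact Option.some.inj hx
    rwa [h2] at h1
  refine (List.Perm.cons x (List.reverse_perm _)).trans ?_
  refine (List.perm_append_singleton x row.dropLast).symm.trans ?_
  rw [hsplit]

lemma gather_perm (f1 : Int → Int) (f2 g : Int → List Int) :
    ∀ (l : List Int), (∀ i ∈ l, (f1 i :: f2 i).Perm (g i)) →
      (l.map f1 ++ l.flatMap f2).Perm (l.flatMap g) := by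
  intro l
  induction l with
  | nil => intro _; simp
  | cons i l ih =>
    intro h
    have hrow := h i (by simp)
    have hrest := ih (fun y hy => h y (by simp [hy]))
    simp only [List.map_cons, List.flatMap_cons, List.cons_append]
    refine List.Perm.trans ?_ (List.Perm.append hrow hrest)
    simp only [List.cons_append]
    refine List.Perm.cons _ ?_
    rw [← List.append_assoc, ← List.append_assoc]
    exact (List.perm_append_comm).append_right _

lemma desc_eq (vals : List Int) :
    PySem.List.sorted vals (fun x => x) true = (srt vals).reverse := by
  have h1 : (PySem.List.sorted vals (fun x => x) true).reverse = srt vals := by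
    apply PySem.List.eq_of_perm_of_pairwise_le_of_injective (fun x => x) (fun a b h => h)
    · exact (List.reverse_perm _).trans ((PySem.List.sorted_perm vals _ true).trans (srt_perm vals).symm)
    · exact List.pairwise_reverse.mpr (PySem.List.sorted_pairwise_rev vals (fun x => x))
    · exact srt_pairwise vals
  rw [← h1, List.reverse_reverse]

-- ===== VERDICT (by name: the statement is the Claim_ definition above) =====
theorem maxKthInMat_spec : Claim_equal_maxKthInMat := by
  intro mat k _ hpre
  unfold Spec_maxKthInMat
  by_cases hklt : k < 1
  · rw [maxKthInMat, if_pos hklt, maxKthInMat_alt, if_pos hklt]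
  · have hk : 1 ≤ k := by omega
    rcases hpre with h | ⟨hne, hm0, hrect⟩
    · omega
    cases mat with
    | nil => exact absurd rfl hne
    | cons r0 mrest =>
    have hm0' : r0.length ≠ 0 := by simpa using hm0
    have hrect' : ∀ row ∈ r0 :: mrest, row.length = r0.length := by
      intro row hrow; simpa using hrect row hrow
    set M : List (List Int) := r0 :: mrest with hM
    set n₀ : Nat := M.length with hn₀
    have hn1 : 1 ≤ n₀ := by rw [hn₀, hM]; simp
    set rows : Int → List Int := fun i => PySem.List.pyGetD M i [] with hrows
    set kn : Nat := k.toNat with hkn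
    have hkn1 : 1 ≤ kn := by omega
    set r₀ : Nat := min kn n₀ with hr₀
    set F : Nat → Int := fun t => ((n₀ : Int) - 1) - (t : Nat) with hF
    -- row facts for valid indices
    have hvalid : ∀ i : Int, 0 ≤ i → i < (n₀ : Int) →
        PySem.List.pyGet? M i = some (rows i) ∧ rows i ∈ M := by
      intro i h0 h1
      have h1' : i < (M.length : Int) := by rw [← hn₀]; exact h1
      constructor
      · rw [PySem.List.pyGet?_eq_some_getElem M h0 h1']
        simp only [hrows]
        rw [PySem.List.pyGetD_eq_getElem M [] h0 h1']
      · simp only [hrows]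
        rw [PySem.List.pyGetD_eq_getElem M [] h0 h1']
        exact List.getElem_mem _
    have hFbound : ∀ t : Nat, t < r₀ → 0 ≤ F t ∧ F t < (n₀ : Int) := by
      intro t ht
      simp only [hF]
      constructor <;> omega
    -- the two index lists
    have hIS1 : PySem.List.pyRange ((M.length : Int) - 1) (-1) (-1) =
        (List.range n₀).map F := by
      rw [PySem.List.pyRange_neg_one]
      have hc : ((M.length : Int) - 1 - (-1)).toNat = n₀ := by rw [← hn₀]; omega
      rw [hc, ← hn₀]
    have htake : (PySem.List.pyRange ((M.length : Int) - 1) (-1) (-1)).take kn =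
        (List.range r₀).map F := by
      rw [hIS1, ← List.map_take, List.take_range, hr₀]
    have hIS2 : PySem.List.pyRange ((M.length : Int) - 1)
        (max (-1) ((M.length : Int) - k - 1)) (-1) = (List.range r₀).map F := by
      rw [PySem.List.pyRange_neg_one]
      have hc : ((M.length : Int) - 1 - max (-1) ((M.length : Int) - k - 1)).toNat = r₀ := by
        rw [← hn₀]; omega
      rw [hc, ← hn₀]
    -- loop 1
    obtain ⟨hp1, heq1, hs1, hl1, hmap1⟩ :=
      loop1_spec M (r0.length : Int) k rows hk
        (PySem.List.pyRange ((M.length : Int) - 1) (-1) (-1)) [] List.Pairwise.nil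
        (by simp) (by
          intro i hi
          simp only [List.length_nil, Nat.sub_zero] at hi
          rw [htake] at hi
          obtain ⟨t, ht, rfl⟩ := List.mem_map.mp hi
          have ht' : t < r₀ := List.mem_range.mp ht
          obtain ⟨hb0, hb1⟩ := hFbound t ht'
          obtain ⟨hget, hmem⟩ := hvalid (F t) hb0 hb1
          refine ⟨hget, ?_⟩
          intro hnil
          exact hm0' (by rw [← hrect' _ hmem, hnil]; rfl))
    -- loop 2
    obtain ⟨hp2, heq2, hs2, hmap2⟩ :=
      loop2_spec M (r0.length : Int) k rows
        (PySem.List.pyRange ((M.length : Int) - 1)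
          (max (-1) ((M.length : Int) - k - 1)) (-1)) hp1 hs1
        (by
          intro i hi
          rw [hIS2] at hi
          obtain ⟨t, ht, rfl⟩ := List.mem_map.mp hi
          have ht' : t < r₀ := List.mem_range.mp ht
          obtain ⟨hb0, hb1⟩ := hFbound t ht'
          obtain ⟨hget, hmem⟩ := hvalid (F t) hb0 hb1
          exact ⟨hget, by rw [hrect' _ hmem]⟩)
    -- drop amount and the flattened bottom rows
    set dN : Nat := n₀ - r₀ with hdN
    set vals : List Int := (M.drop dN).flatten with hvals
    -- the processed value lists
    set f1 : Int → Int := fun i => (rows i).getLast?.getD 0 with hf1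
    set f2 : Int → List Int := fun i =>
      (PySem.List.pyRange ((r0.length : Int) - 2) (-1) (-1)).map
        (fun j => PySem.List.pyGetD (rows i) j 0) with hf2
    set l : List Int := (List.range r₀).map F with hl
    -- permutation of processed values with the flattened rows
    have hrowperm : ∀ i ∈ l, ((f1 i) :: f2 i).Perm (rows i) := by
      intro i hi
      obtain ⟨t, ht, rfl⟩ := List.mem_map.mp hi
      have ht' : t < r₀ := List.mem_range.mp ht
      obtain ⟨hb0, hb1⟩ := hFbound t ht'
      obtain ⟨-, hmem⟩ := hvalid (F t) hb0 hb1
      have hlen : (rows (F t)).length = r0.length := hrect' _ hmem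
      have hne' : rows (F t) ≠ [] := by
        intro hnil; exact hm0' (by rw [← hlen, hnil]; rfl)
      have hcd : f2 (F t) = (rows (F t)).dropLast.reverse := by
        rw [hf2]
        simp only
        rw [← hlen]
        exact countdown_row (rows (F t))
      rw [hcd, hf1]
      exact row_perm (rows (F t)) hne'
    have hmaprows : l.map rows = (M.drop dN).reverse := by
      apply List.ext_getElem
      · simp only [List.length_map, List.length_range, List.length_reverse,
          List.length_drop, hl, hdN]
        omega
      · intro t h1 h2
        simp only [hl, List.getElem_map, List.getElem_range, List.getElem_reverse,
          List.getElem_drop]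
        have ht' : t < r₀ := by simpa [hl] using h1
        obtain ⟨hb0, hb1⟩ := hFbound t ht'
        rw [hrows]
        simp only
        rw [PySem.List.pyGetD_eq_getElem M [] hb0 (by rw [← hn₀]; exact hb1)]
        congr 1
        simp only [List.length_drop, ← hn₀, hF]
        omega
    have hflatperm : (l.flatMap rows).Perm vals := by
      rw [List.flatMap_def, hmaprows, hvals]
      exact (List.reverse_perm (M.drop dN)).flatten
    have hperm : (l.map f1 ++ l.flatMap f2).Perm vals :=
      (gather_perm f1 f2 rows l hrowperm).trans hflatperm
    -- the final heap's values are the top-k of vals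
    have hfinal : hp2.map (·.1) = topk kn (l.map f1 ++ l.flatMap f2) := by
      rw [hmap2, hmap1]
      simp only [List.length_nil, Nat.sub_zero, List.map_nil]
      rw [htake, hIS2, ← List.foldl_append,
        show ([] : List Int) = topk kn [] from (topk_nil kn).symm]
      rw [hkn, foldl_vstep_topk hk, List.nil_append]
    have hsrteq : srt (l.map f1 ++ l.flatMap f2) = srt vals :=
      PySem.List.sorted_eq_sorted_of_perm _ _ _ (fun a b h => h) hperm
    have hlenP : (l.map f1 ++ l.flatMap f2).length = vals.length := hperm.length_eq
    have htopk : topk kn (l.map f1 ++ l.flatMap f2) = (srt vals).drop (vals.length - kn) := by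
      rw [topk, hsrteq, hlenP]
    -- vals is nonempty
    have hNpos : 0 < vals.length := by
      rcases Nat.eq_zero_or_pos vals.length with h0 | h0
      · exfalso
        have hnil : vals = [] := List.length_eq_zero_iff.mp h0
        have hdrop : dN < M.length := by rw [← hn₀]; omega
        have hmem0 : (M.drop dN)[0]'(by simp [List.length_drop]; omega) ∈ M.drop dN :=
          List.getElem_mem _
        have : (M.drop dN)[0]'(by simp [List.length_drop]; omega) = [] :=
          (List.flatten_eq_nil_iff.mp (hvals ▸ hnil)) _ hmem0
        exact hm0' (by rw [← hrect' _ (List.drop_subset _ _ hmem0), this]; rfl)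
      · exact h0
    set N : Nat := vals.length with hN
    have hd0lt : N - kn < N := by omega
    have hd0lt' : N - kn < (srt vals).length := by rw [length_srt, ← hN]; omega
    -- the heap is nonempty; read off its head
    cases hp2 with
    | nil =>
      exfalso
      have := congrArg List.length hfinal
      rw [htopk] at this
      simp only [List.map_nil, List.length_nil, List.length_drop, length_srt, ← hN] at this
      omega
    | cons hh tt =>
      have hhead : hh.1 = (srt vals)[N - kn]'hd0lt' := by
        have hcons := List.drop_eq_getElem_cons (l := srt vals) (i := N - kn) hd0lt'
        rw [htopk, hcons] at hfinal
        simp only [List.map_cons] at hfinal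
        exact (List.cons_eq_cons.mp hfinal).1
      -- reduce A
      have hA : maxKthInMat M k = some hh.1 := by
        have hget0 : PySem.List.pyGet? M 0 = some r0 := by
          rw [hM]; exact PySem.List.pyGet?_zero_cons r0 mrest
        rw [maxKthInMat, if_neg hklt]
        simp only [hget0, heq1, heq2]
      -- reduce B
      have hB : maxKthInMat_alt M k =
          PySem.List.pyGet? (PySem.List.sorted vals (fun x => x) true)
            (min k ((N : Int)) - 1) := by
        rw [maxKthInMat_alt, if_neg hklt]
        have hslice : PySem.List.slice M (some (max 0 ((M.length : Int) - k))) none =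
            M.drop dN := by
          rw [PySem.List.slice_from M (le_max_left 0 _)]
          congr 1
          rw [hdN, hr₀, hkn, ← hn₀]; omega
        simp only [hslice]
        have hid : (M.drop dN).flatMap (fun row => row) = vals := by
          rw [hvals, show (fun (row : List Int) => row) = id from rfl, List.flatMap_id]
        simp only [hid, ← hN]
      rw [hA, hB, desc_eq vals]
      have hlenrev : ((srt vals).reverse.length : Int) = (N : Int) := by
        rw [List.length_reverse, length_srt, hN]
      have hidx0 : 0 ≤ min k ((N : Int)) - 1 := by omega
      have hidxlt : min k ((N : Int)) - 1 < ((srt vals).reverse.length : Int) := by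
        rw [hlenrev]; omega
      rw [PySem.List.pyGet?_eq_some_getElem _ hidx0 hidxlt, List.getElem_reverse]
      have hidxeq : (srt vals).length - 1 - (min k ((N : Int)) - 1).toNat = N - kn := by
        rw [length_srt]; omega
      simp only [hidxeq]
      exact congrArg some hhead
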